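-- pv_equiv track=rewrite | github.com/KevinH48264/Open-Reasoner-Zero | orz/ppo/trainer_annotated.py | _split_weighted_objects
-- ===== SOURCE A (Python) =====
-- from heapq import heapify, heappop, heappush  # For maintaining heaps (priority queues).
--
-- def _split_weighted_objects(items, n):
--     result = [[] for _ in range(n)]
--     heap = [(0, i) for i in range(n)]
--     heapify(heap)
--     sorted_items = sorted(items, key=lambda x: x[0], reverse=True)
--     for weight, obj in sorted_items:
--         current_sum, index = heappop(heap)
--         result[index].append(obj)
--         heappush(heap, (current_sum + weight, index))
--     return result
-- ===== SOURCE B (Python) =====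
-- def _split_weighted_objects(items, n):
--     result = [[] for _ in range(n)]
--     sums = [0] * n
--     for weight, obj in sorted(items, key=lambda x: x[0], reverse=True):
--         best = 0
--         for i in range(1, n):
--             if sums[i] < sums[best]:
--                 best = i
--         result[best].append(obj)
--         sums[best] += weight
--     return result
-- ===== Notes on version B (the rewrite author's own statement) =====
-- stated objective: simpler
-- what changed: Replaced the binary heap (heapify/heappop/heappush) by a flat list of bin loads with a linear first-minimum scan per item; the scan's lowest-index tie-break reproduces the heap's lexicographic (sum, index) order.
import Mathlib
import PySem

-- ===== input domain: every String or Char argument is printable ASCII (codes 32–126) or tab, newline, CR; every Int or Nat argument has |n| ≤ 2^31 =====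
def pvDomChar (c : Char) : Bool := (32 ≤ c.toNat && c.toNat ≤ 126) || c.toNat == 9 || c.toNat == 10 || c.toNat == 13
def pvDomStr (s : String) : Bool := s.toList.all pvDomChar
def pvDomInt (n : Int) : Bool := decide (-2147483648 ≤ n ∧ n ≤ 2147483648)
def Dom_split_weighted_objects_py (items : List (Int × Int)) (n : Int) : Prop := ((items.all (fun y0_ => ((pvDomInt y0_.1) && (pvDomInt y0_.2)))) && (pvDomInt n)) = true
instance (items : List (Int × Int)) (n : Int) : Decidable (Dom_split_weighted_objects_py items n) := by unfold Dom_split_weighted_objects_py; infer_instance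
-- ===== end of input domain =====

-- B replaces A's binary heap by a flat list of bin loads with a linear first-minimum
-- scan per item (objective: simpler); same greedy LPT result, lowest-index tie-break.

-- ===== PORT A =====
-- Python tuple comparison (a, b) < (c, d), as used by heapq on (sum, index) pairs
def pairLt (a b : Int × Int) : Bool := a.1 < b.1 || (a.1 == b.1 && a.2 < b.2)

-- heapq._siftdown(heap, startpos, pos); newitem is the value being placed at the hole
def pySiftdown (h : List (Int × Int)) (startpos pos : Nat) (newitem : Int × Int) : List (Int × Int) :=
  if startpos < pos then
    let parentpos := (pos - 1) / 2
    let parent := h[parentpos]!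
    if pairLt newitem parent then
      pySiftdown (h.set pos parent) startpos parentpos newitem
    else h.set pos newitem
  else h.set pos newitem
termination_by pos
decreasing_by omega

-- heapq._siftup(heap, pos); startpos threaded, newitem = heap[pos] read by the caller
def pySiftup (h : List (Int × Int)) (startpos pos : Nat) (newitem : Int × Int) : List (Int × Int) :=
  if hc : 2*pos + 1 < h.length then
    let childpos := if 2*pos + 2 < h.length && !pairLt h[2*pos+1]! h[2*pos+2]! then 2*pos + 2 else 2*pos + 1
    pySiftup (h.set pos h[childpos]!) startpos childpos newitem
  else
    pySiftdown (h.set pos newitem) startpos pos newitem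
termination_by h.length - pos
decreasing_by simp only [List.length_set]; split <;> omega

def pyHeappush (h : List (Int × Int)) (item : Int × Int) : List (Int × Int) :=
  pySiftdown (h ++ [item]) 0 h.length item

-- returns none exactly where Python's heappop raises IndexError (empty heap)
def pyHeappop (h : List (Int × Int)) : Option ((Int × Int) × List (Int × Int)) :=
  match h.getLast? with
  | none => none
  | some lastelt =>
    let h' := h.dropLast
    if h' ≠ [] then
      some (h'[0]!, pySiftup (h'.set 0 lastelt) 0 0 lastelt)
    else some (lastelt, [])

def pyHeapify (h : List (Int × Int)) : List (Int × Int) :=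
  (List.range (h.length / 2)).reverse.foldl (fun acc i => pySiftup acc i i acc[i]!) h

def split_weighted_objects_py (items : List (Int × Int)) (n : Int) : List (List Int) :=
  let result : List (List Int) := List.replicate n.toNat []
  let heap : List (Int × Int) := (List.range n.toNat).map (fun (i : Nat) => ((0:Int), (i:Int)))
  let heap := pyHeapify heap
  let sortedItems := PySem.List.sorted items (fun x => x.1) true
  (sortedItems.foldl (fun (st : List (List Int) × List (Int × Int)) wo =>
      match pyHeappop st.2 with
      | none => st  -- unreachable under Pre_: Python raises IndexError here
      | some ((cs, idx), rest) =>
          -- idx is always a nonnegative in-range bin index, so .toNat is exact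
          (st.1.set idx.toNat (st.1[idx.toNat]! ++ [wo.2]), pyHeappush rest (cs + wo.1, idx)))
    (result, heap)).1

-- ===== PORT B =====
def split_weighted_objects_py_alt (items : List (Int × Int)) (n : Int) : List (List Int) :=
  let result : List (List Int) := List.replicate n.toNat []
  let sums : List Int := List.replicate n.toNat 0
  (((PySem.List.sorted items (fun x => x.1) true)).foldl (fun (st : List (List Int) × List Int) wo =>
      let best : Int := (PySem.List.pyRange 1 n 1).foldl
        (fun b i => if st.2[i.toNat]! < st.2[b.toNat]! then i else b) 0
      -- best is always a nonnegative in-range bin index, so .toNat is exact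
      (st.1.set best.toNat (st.1[best.toNat]! ++ [wo.2]), st.2.set best.toNat (st.2[best.toNat]! + wo.1)))
    (result, sums)).1

-- ===== PRECONDITION & SPEC =====
-- Pre_ excludes nonempty items with n < 1: there both A and B raise IndexError
-- (A pops from an empty heap, B indexes an empty result list).
def Pre_split_weighted_objects_py (items : List (Int × Int)) (n : Int) : Prop := items = [] ∨ 1 ≤ n
instance (items : List (Int × Int)) (n : Int) : Decidable (Pre_split_weighted_objects_py items n) := by unfold Pre_split_weighted_objects_py; infer_instance

def pvWitness_split_weighted_objects_py : (List (Int × Int)) × Int := ([(3,1),(3,2),(1,3),(5,4),(2,5)], 3)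

def Spec_split_weighted_objects_py (items : List (Int × Int)) (n : Int) (out : List (List Int)) : Prop := out = split_weighted_objects_py_alt items n
instance (items : List (Int × Int)) (n : Int) (out : List (List Int)) : Decidable (Spec_split_weighted_objects_py items n out) := by unfold Spec_split_weighted_objects_py; infer_instance

-- ===== CLAIM (what is proved, stated in full; the proofs are below) =====
def Claim_equal_split_weighted_objects_py : Prop := ∀ (items : List (Int × Int)) (n : Int), Dom_split_weighted_objects_py items n → Pre_split_weighted_objects_py items n → Spec_split_weighted_objects_py items n (split_weighted_objects_py items n)

-- ===== LEMMAS AND PROOFS =====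

-- ---------- order facts about pairLt (Python tuple <) ----------
theorem pairLt_iff (a b : Int × Int) : pairLt a b = true ↔ a.1 < b.1 ∨ (a.1 = b.1 ∧ a.2 < b.2) := by
  simp [pairLt]

theorem pairLt_false_iff (a b : Int × Int) : pairLt a b = false ↔ b.1 < a.1 ∨ (b.1 = a.1 ∧ b.2 ≤ a.2) := by
  rw [← Bool.not_eq_true, pairLt_iff]
  constructor <;> intro h <;> [skip; skip] <;> omega

theorem pairLt_irrefl (a : Int × Int) : pairLt a a = false := by
  rw [pairLt_false_iff]; omega

theorem pairLt_asymm {a b : Int × Int} (h : pairLt a b = true) : pairLt b a = false := by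
  rw [pairLt_iff] at h; rw [pairLt_false_iff]; omega

theorem pairLt_false_trans {a b c : Int × Int} (h1 : pairLt a b = false) (h2 : pairLt b c = false) :
    pairLt a c = false := by
  rw [pairLt_false_iff] at *; omega

theorem pairLt_false_of_false_of_lt {s p i : Int × Int} (h1 : pairLt s p = false)
    (h2 : pairLt i p = true) : pairLt s i = false := by
  rw [pairLt_false_iff] at h1 ⊢; rw [pairLt_iff] at h2; omega

theorem pairLt_antisymm {a b : Int × Int} (h1 : pairLt a b = false) (h2 : pairLt b a = false) :
    a = b := by
  rw [pairLt_false_iff] at *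
  have : a.1 = b.1 ∧ a.2 = b.2 := by omega
  exact Prod.ext this.1 this.2

-- ---------- permutation toolkit ----------
theorem cons_set_perm {α : Type} (l : List α) (k : Nat) (hk : k < l.length) (x : α) :
    (l[k] :: l.set k x).Perm (x :: l) := by
  induction l generalizing k with
  | nil => simp at hk
  | cons a t ih =>
    cases k with
    | zero => simpa using List.Perm.swap x a t
    | succ k =>
      have hk' : k < t.length := by simpa using hk
      simp only [List.getElem_cons_succ, List.set_cons_succ]
      exact (List.Perm.swap a t[k] (t.set k x)).trans
        (((ih k hk').cons a).trans (List.Perm.swap x a t))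

theorem mset_set {α : Type} (l : List α) (k : Nat) (hk : k < l.length) (x : α) :
    (↑(l.set k x) : Multiset α) + {l[k]} = {x} + ↑l := by
  have := cons_set_perm l k hk x
  have h2 : (↑(l[k] :: l.set k x) : Multiset α) = ↑(x :: l) := Quot.sound this
  calc (↑(l.set k x) : Multiset α) + {l[k]} = {l[k]} + ↑(l.set k x) := add_comm _ _
    _ = l[k] ::ₘ ↑(l.set k x) := Multiset.singleton_add _ _
    _ = x ::ₘ ↑l := h2
    _ = {x} + ↑l := (Multiset.singleton_add _ _).symm

theorem set_set_perm {α : Type} (l : List α) (i j : Nat) (hi : i < l.length) (hj : j < l.length)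
    (hij : i ≠ j) (x : α) : ((l.set i l[j]).set j x).Perm (l.set i x) := by
  rw [← Multiset.coe_eq_coe]
  have h1 := mset_set (l.set i l[j]) j (by simpa using hj) x
  rw [List.getElem_set_ne hij] at h1
  have h2 := mset_set l i hi (l[j])
  have h3 := mset_set l i hi x
  have key : (↑((l.set i l[j]).set j x) : Multiset α) + ({l[j]} + {l[i]}) =
      ↑(l.set i x) + ({l[j]} + {l[i]}) := by
    calc (↑((l.set i l[j]).set j x) : Multiset α) + ({l[j]} + {l[i]})
        = (↑((l.set i l[j]).set j x) + {l[j]}) + {l[i]} := by rw [add_assoc]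
      _ = ({x} + ↑(l.set i l[j])) + {l[i]} := by rw [h1]
      _ = {x} + (↑(l.set i l[j]) + {l[i]}) := by rw [add_assoc]
      _ = {x} + ({l[j]} + ↑l) := by rw [h2]
      _ = {l[j]} + ({x} + ↑l) := by abel
      _ = {l[j]} + (↑(l.set i x) + {l[i]}) := by rw [h3]
      _ = ↑(l.set i x) + ({l[j]} + {l[i]}) := by abel
  exact add_right_cancel key

-- ---------- heap predicate ----------
-- HeapAbove k h: every parent-child edge whose parent index is ≥ k is ordered
def HeapAbove (k : Nat) (h : List (Int × Int)) : Prop :=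
  ∀ j, 0 < j → (hj : j < h.length) → k ≤ (j-1)/2 →
    pairLt h[j] (h[(j-1)/2]'(by omega)) = false

def IsHeap (h : List (Int × Int)) : Prop := HeapAbove 0 h

-- j lies in the subtree rooted at s (parent chain from j reaches s)
def isDesc (s j : Nat) : Prop :=
  if s < j then isDesc s ((j-1)/2) else j = s
termination_by j
decreasing_by omega

theorem isDesc_iff (s j : Nat) : isDesc s j ↔ (if s < j then isDesc s ((j-1)/2) else j = s) := by
  rw [isDesc]

theorem isDesc_self (s : Nat) : isDesc s s := by rw [isDesc_iff]; simp

theorem isDesc_le {s j : Nat} (h : isDesc s j) : s ≤ j := by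
  rw [isDesc_iff] at h
  by_cases hs : s < j
  · omega
  · simp [hs] at h; omega

theorem isDesc_zero (j : Nat) : isDesc 0 j := by
  induction j using Nat.strong_induction_on with
  | _ j ih =>
    rw [isDesc_iff]
    rcases Nat.eq_zero_or_pos j with hj | hj
    · simp [hj]
    · simp only [hj, if_pos]
      exact ih _ (by omega)

theorem isDesc_child {s j : Nat} (h : isDesc s j) (c : Nat) (hc : (c-1)/2 = j) (hcj : j < c) :
    isDesc s c := by
  rw [isDesc_iff]
  have hs := isDesc_le h
  rw [if_pos (by omega), hc]
  exact h

theorem getElem_idx_congr {α : Type} (l : List α) {i j : Nat} (hij : i = j) (hi : i < l.length) :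
    l[i]'hi = l[j]'(hij ▸ hi) := by subst hij; rfl

-- ---------- siftdown / siftup specifications ----------
theorem siftdown_spec (pos : Nat) : ∀ (h : List (Int × Int)) (start : Nat) (item : Int × Int)
    (hpos : pos < h.length) (hdesc : isDesc start pos)
    (hb : ∀ j, 0 < j → (hj : j < h.length) → j ≠ pos → (j-1)/2 ≠ pos → start ≤ (j-1)/2 →
        pairLt h[j] (h[(j-1)/2]'(by omega)) = false)
    (hc : ∀ j, 0 < j → (hj : j < h.length) → (j-1)/2 = pos → pairLt h[j] item = false)
    (hd : start < pos → ∀ j, 0 < j → (hj : j < h.length) → (j-1)/2 = pos →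
        pairLt h[j] (h[(pos-1)/2]'(by omega)) = false),
    (pySiftdown h start pos item).Perm (h.set pos item) ∧
      HeapAbove start (pySiftdown h start pos item) := by
  induction pos using Nat.strong_induction_on with
  | _ pos ih =>
    intro h start item hpos hdesc hb hc hd
    rw [pySiftdown]
    by_cases hsp : start < pos
    · simp only [if_pos hsp]
      have hpplt : (pos - 1) / 2 < pos := by omega
      have hpplen : (pos - 1) / 2 < h.length := by omega
      rw [getElem!_pos h ((pos - 1) / 2) hpplen]
      have hdesc2 : isDesc start ((pos - 1) / 2) := by
        rw [isDesc_iff, if_pos hsp] at hdesc; exact hdesc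
      have hstpp : start ≤ (pos - 1) / 2 := isDesc_le hdesc2
      by_cases hlt : pairLt item (h[(pos - 1) / 2]'hpplen) = true
      · rw [if_pos hlt]
        have hlen2 : (h.set pos (h[(pos - 1) / 2]'hpplen)).length = h.length := by simp
        have spec := ih ((pos - 1) / 2) hpplt (h.set pos (h[(pos - 1) / 2]'hpplen)) start item
          (by omega) hdesc2 ?_ ?_ ?_
        · refine ⟨spec.1.trans ?_, spec.2⟩
          exact set_set_perm h pos ((pos - 1) / 2) hpos hpplen (by omega) item
        · -- hb for the recursive call
          intro j hj0 hj hjne hpne hst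
          have hjlen : j < h.length := by omega
          have hplen : (j-1)/2 < h.length := by omega
          rw [List.getElem_set, List.getElem_set]
          rcases eq_or_ne j pos with hjp | hjp
          · exfalso; apply hpne; omega
          · rw [if_neg (by omega)]
            rcases eq_or_ne ((j-1)/2) pos with hpp2 | hpp2
            · rw [if_pos (by omega)]
              have := hd hsp j hj0 hjlen hpp2
              exact this
            · rw [if_neg (by omega)]
              exact hb j hj0 hjlen hjp hpp2 hst
        · -- hc for the recursive call
          intro j hj0 hj hpar
          have hjlen : j < h.length := by omega
          rw [List.getElem_set]
          rcases eq_or_ne j pos with hjp | hjp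
          · rw [if_pos (by omega)]
            exact pairLt_asymm hlt
          · rw [if_neg (by omega)]
            have h1 := hb j hj0 hjlen hjp (by omega) (by omega)
            have e := getElem_idx_congr h hpar (show (j-1)/2 < h.length by omega)
            rw [e] at h1
            exact pairLt_false_of_false_of_lt h1 hlt
        · -- hd for the recursive call
          intro hsp2 j hj0 hj hpar
          have hjlen : j < h.length := by omega
          have hppplen : (((pos-1)/2) - 1) / 2 < h.length := by omega
          have hdesc3 : isDesc start ((((pos-1)/2) - 1) / 2) := by
            rw [isDesc_iff, if_pos hsp2] at hdesc2; exact hdesc2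
          have hstppp : start ≤ (((pos-1)/2) - 1) / 2 := isDesc_le hdesc3
          have hedge : pairLt (h[(pos-1)/2]'hpplen) (h[(((pos-1)/2) - 1) / 2]'hppplen) = false :=
            hb ((pos-1)/2) (by omega) hpplen (by omega) (by omega) hstppp
          rw [List.getElem_set, List.getElem_set]
          rw [if_neg (show ¬ pos = (((pos-1)/2) - 1) / 2 by omega)]
          rcases eq_or_ne j pos with hjp | hjp
          · rw [if_pos (by omega)]
            exact hedge
          · rw [if_neg (by omega)]
            have h1 := hb j hj0 hjlen hjp (by omega) (by omega)
            have e := getElem_idx_congr h hpar (show (j-1)/2 < h.length by omega)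
            rw [e] at h1
            exact pairLt_false_trans h1 hedge
      · rw [if_neg hlt]
        refine ⟨List.Perm.refl _, ?_⟩
        intro j hj0 hj hst
        have hjlen : j < h.length := by simpa using hj
        have hplen : (j-1)/2 < h.length := by omega
        rw [List.getElem_set, List.getElem_set]
        rcases eq_or_ne j pos with hjp | hjp
        · rw [if_pos (by omega), if_neg (by omega)]
          have e := getElem_idx_congr h (show (j-1)/2 = (pos-1)/2 by omega) hplen
          rw [e]
          exact Bool.eq_false_iff.mpr hlt
        · rw [if_neg (by omega)]
          rcases eq_or_ne ((j-1)/2) pos with hpp2 | hpp2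
          · rw [if_pos (by omega)]
            exact hc j hj0 hjlen hpp2
          · rw [if_neg (by omega)]
            exact hb j hj0 hjlen hjp hpp2 hst
    · simp only [if_neg hsp]
      have hps : pos = start := by have := isDesc_le hdesc; omega
      refine ⟨List.Perm.refl _, ?_⟩
      intro j hj0 hj hst
      have hjlen : j < h.length := by simpa using hj
      have hplen : (j-1)/2 < h.length := by omega
      rw [List.getElem_set, List.getElem_set]
      rcases eq_or_ne j pos with hjp | hjp
      · exfalso; omega
      · rw [if_neg (by omega)]
        rcases eq_or_ne ((j-1)/2) pos with hpp2 | hpp2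
        · rw [if_pos (by omega)]
          exact hc j hj0 hjlen hpp2
        · rw [if_neg (by omega)]
          exact hb j hj0 hjlen hjp hpp2 hst

theorem siftup_spec (m : Nat) : ∀ (h : List (Int × Int)) (start pos : Nat) (item : Int × Int)
    (hm : h.length - pos = m) (hpos : pos < h.length) (hdesc : isDesc start pos)
    (hB : ∀ j, 0 < j → (hj : j < h.length) → j ≠ pos → (j-1)/2 ≠ pos → start ≤ (j-1)/2 →
        pairLt h[j] (h[(j-1)/2]'(by omega)) = false)
    (hF : start < pos → ∀ j, 0 < j → (hj : j < h.length) → (j-1)/2 = pos →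
        pairLt h[j] (h[(pos-1)/2]'(by omega)) = false),
    (pySiftup h start pos item).Perm (h.set pos item) ∧
      HeapAbove start (pySiftup h start pos item) := by
  induction m using Nat.strong_induction_on with
  | _ m ih =>
    intro h start pos item hm hpos hdesc hB hF
    rw [pySiftup]
    by_cases hch : 2*pos + 1 < h.length
    · simp only [dif_pos hch]
      have key : ∀ (c : Nat) (hc0 : 0 < c) (hclen : c < h.length) (hcpar : (c-1)/2 = pos)
          (hsib : ∀ s, 0 < s → (hs : s < h.length) → (s-1)/2 = pos → s ≠ c →
            pairLt (h[s]'hs) (h[c]'hclen) = false),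
          (pySiftup (h.set pos (h[c]'hclen)) start c item).Perm (h.set pos item) ∧
            HeapAbove start (pySiftup (h.set pos (h[c]'hclen)) start c item) := by
        intro c hc0 hclen hcpar hsib
        have hposc : pos < c := by omega
        have spec := ih (h.length - c) (by omega) (h.set pos (h[c]'hclen)) start c item
          (by simp) (by simpa using hclen) (isDesc_child hdesc c hcpar hposc) ?_ ?_
        · exact ⟨spec.1.trans (set_set_perm h pos c hpos hclen (by omega) item), spec.2⟩
        · -- hB for the recursive call
          intro j hj0 hj hjne hpne hst
          have hjlen : j < h.length := by simpa using hj
          have hplen : (j-1)/2 < h.length := by omega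
          rw [List.getElem_set, List.getElem_set]
          rcases eq_or_ne j pos with hjp | hjp
          · rw [if_pos (by omega), if_neg (by omega)]
            have e := getElem_idx_congr h (show (j-1)/2 = (pos-1)/2 by omega)
              (show (j-1)/2 < h.length by omega)
            rw [e]
            exact hF (by omega) c (by omega) hclen hcpar
          · rw [if_neg (by omega)]
            rcases eq_or_ne ((j-1)/2) pos with hpp2 | hpp2
            · rw [if_pos (by omega)]
              exact hsib j hj0 hjlen hpp2 hjne
            · rw [if_neg (by omega)]
              exact hB j hj0 hjlen hjp hpp2 hst
        · -- hF for the recursive call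
          intro hsc j hj0 hj hpar
          have hjlen : j < h.length := by simpa using hj
          have hjc : c < j := by omega
          rw [List.getElem_set, List.getElem_set]
          rw [if_neg (show ¬ pos = j by omega), if_pos (show pos = (c-1)/2 by omega)]
          have h1 := hB j hj0 hjlen (by omega) (by omega) (by omega)
          have e := getElem_idx_congr h hpar (show (j-1)/2 < h.length by omega)
          rw [e] at h1
          exact h1
      by_cases hr : 2*pos + 2 < h.length
      · rw [getElem!_pos h (2*pos+1) hch, getElem!_pos h (2*pos+2) hr]
        by_cases hlt2 : pairLt (h[2*pos+1]'hch) (h[2*pos+2]'hr) = true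
        · simp only [decide_eq_true hr, hlt2, Bool.not_true, Bool.and_false,
            Bool.false_eq_true, reduceIte]
          rw [getElem!_pos h (2*pos+1) hch]
          refine key (2*pos+1) (by omega) hch (by omega) ?_
          intro s hs0 hs hspar hsne
          have : s = 2*pos+2 := by omega
          subst this
          exact pairLt_asymm hlt2
        · simp only [decide_eq_true hr, Bool.eq_false_iff.mpr hlt2, Bool.not_false,
            Bool.and_true, reduceIte]
          rw [getElem!_pos h (2*pos+2) hr]
          refine key (2*pos+2) (by omega) hr (by omega) ?_
          intro s hs0 hs hspar hsne
          have : s = 2*pos+1 := by omega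
          subst this
          exact Bool.eq_false_iff.mpr hlt2
      · simp only [decide_eq_false hr, Bool.false_and, Bool.false_eq_true, reduceIte]
        rw [getElem!_pos h (2*pos+1) hch]
        refine key (2*pos+1) (by omega) hch (by omega) ?_
        intro s hs0 hs hspar hsne
        exfalso
        omega
    · simp only [dif_neg hch]
      have spec := siftdown_spec pos (h.set pos item) start item (by simpa using hpos) hdesc
        ?_ ?_ ?_
      · rw [List.set_set] at spec
        exact spec
      · intro j hj0 hj hjne hpne hst
        have hjlen : j < h.length := by simpa using hj
        rw [List.getElem_set, List.getElem_set, if_neg (by omega), if_neg (by omega)]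
        exact hB j hj0 hjlen hjne hpne hst
      · intro j hj0 hj hpar
        exfalso
        have hjlen : j < h.length := by simpa using hj
        omega
      · intro _ j hj0 hj hpar
        exfalso
        have hjlen : j < h.length := by simpa using hj
        omega

-- ---------- wrappers ----------
theorem heappush_spec (h : List (Int × Int)) (x : Int × Int) (hh : IsHeap h) :
    IsHeap (pyHeappush h x) ∧ (↑(pyHeappush h x) : Multiset (Int × Int)) = {x} + ↑h := by
  unfold pyHeappush
  have hlen : h.length < (h ++ [x]).length := by simp
  have spec := siftdown_spec h.length (h ++ [x]) 0 x hlen (isDesc_zero _) ?_ ?_ ?_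
  · refine ⟨spec.2, ?_⟩
    have e : (h ++ [x]).set h.length x = h ++ [x] := by
      have e2 : (h ++ [x])[h.length]'hlen = x := by simp
      conv_rhs => rw [← List.set_getElem_self hlen, e2]
    rw [Multiset.coe_eq_coe.mpr spec.1, e]
    have : (↑(h ++ [x]) : Multiset (Int × Int)) = ↑h + ↑([x] : List (Int × Int)) := by
      exact_mod_cast (Multiset.coe_add h [x]).symm
    rw [this]
    simp [add_comm]
  · intro j hj0 hj hjne hpne hst
    have hjlen : j < h.length := by
      have : j < h.length + 1 := by simpa using hj
      omega
    have hplen : (j-1)/2 < h.length := by omega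
    rw [List.getElem_append_left hjlen, List.getElem_append_left hplen]
    exact hh j hj0 hjlen (Nat.zero_le _)
  · intro j hj0 hj hpar
    exfalso
    have : j < h.length + 1 := by simpa using hj
    omega
  · intro h0 j hj0 hj hpar
    exfalso
    have : j < h.length + 1 := by simpa using hj
    omega

theorem heappop_spec (h : List (Int × Int)) (hh : IsHeap h) (hne : h ≠ []) :
    ∃ r, pyHeappop h = some (h[0]'(by cases h <;> simp_all), r) ∧ IsHeap r ∧
      (↑h : Multiset (Int × Int)) = {h[0]'(by cases h <;> simp_all)} + ↑r := by
  have h0 : 0 < h.length := List.length_pos_iff.mpr hne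
  unfold pyHeappop
  rw [List.getLast?_eq_some_getLast hne]
  by_cases hd1 : h.dropLast = []
  · have hlen1 : h.length = 1 := by
      have : h.dropLast.length = h.length - 1 := List.length_dropLast
      rw [hd1] at this
      simp at this
      omega
    obtain ⟨a, ha⟩ : ∃ a, h = [a] := by
      cases h with
      | nil => simp at h0
      | cons a t =>
        cases t with
        | nil => exact ⟨a, rfl⟩
        | cons b t' => simp at hlen1
    subst ha
    refine ⟨[], by simp [hd1], ?_, by simp⟩
    intro j hj0 hj hst
    simp at hj
  · simp only [hd1, if_pos, ne_eq, not_false_eq_true]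
    set lastelt := h.getLast hne with hlast
    set h' := h.dropLast with hh'
    have hlen' : h'.length = h.length - 1 := by rw [hh']; exact List.length_dropLast
    have h'0 : 0 < h'.length := List.length_pos_iff.mpr hd1
    have hsetlen : (h'.set 0 lastelt).length = h'.length := by simp
    have spec := siftup_spec ((h'.set 0 lastelt).length - 0) (h'.set 0 lastelt) 0 0 lastelt
      rfl (by omega) (isDesc_self 0) ?_ ?_
    · have hget : h'[0]! = h[0]'h0 := by
        rw [getElem!_pos h' 0 h'0]; exact List.getElem_dropLast _
      rw [hget]
      refine ⟨_, rfl, spec.2, ?_⟩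
      have hperm : (pySiftup (h'.set 0 lastelt) 0 0 lastelt).Perm (h'.set 0 lastelt) := by
        have := spec.1
        rwa [List.set_set] at this
      rw [Multiset.coe_eq_coe.mpr hperm]
      have hms := mset_set h' 0 h'0 lastelt
      have hsplit : (↑h : Multiset (Int × Int)) = ↑h' + {lastelt} := by
        conv_lhs => rw [← List.dropLast_append_getLast hne]
        rw [← hh', ← hlast]
        exact_mod_cast (Multiset.coe_add h' [lastelt])
      have hget2 : h'[0]'h'0 = h[0]'h0 := List.getElem_dropLast _
      calc (↑h : Multiset (Int × Int)) = ↑h' + {lastelt} := hsplit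
        _ = {lastelt} + ↑h' := add_comm _ _
        _ = ↑(h'.set 0 lastelt) + {h'[0]'h'0} := hms.symm
        _ = {h[0]'h0} + ↑(h'.set 0 lastelt) := by rw [hget2, add_comm]
    · intro j hj0 hj hjne hpne hst
      have hjlen : j < h'.length := by omega
      have hjlen2 : j < h.length := by omega
      have hplen : (j-1)/2 < h'.length := by omega
      have hplen2 : (j-1)/2 < h.length := by omega
      rw [List.getElem_set_ne (by omega), List.getElem_set_ne (by omega),
        List.getElem_dropLast, List.getElem_dropLast]
      exact hh j hj0 hjlen2 (Nat.zero_le _)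
    · intro habs
      exact absurd habs (by omega)

theorem heapify_aux (k : Nat) : ∀ (h : List (Int × Int)), 2*k ≤ h.length → HeapAbove k h →
    IsHeap ((List.range k).reverse.foldl (fun acc i => pySiftup acc i i acc[i]!) h) ∧
    (↑((List.range k).reverse.foldl (fun acc i => pySiftup acc i i acc[i]!) h) :
      Multiset (Int × Int)) = ↑h := by
  induction k with
  | zero =>
    intro h _ hab
    simp only [List.range_zero, List.reverse_nil, List.foldl_nil]
    exact ⟨hab, trivial⟩
  | succ k ih =>
    intro h hk hab
    have hrev : (List.range (k+1)).reverse = k :: (List.range k).reverse := by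
      rw [List.range_succ]
      simp
    rw [hrev, List.foldl_cons]
    have hklen : k < h.length := by omega
    have spec := siftup_spec (h.length - k) h k k (h[k]!) rfl hklen (isDesc_self k) ?_ ?_
    · have hperm : (pySiftup h k k (h[k]!)).Perm h := by
        have e : h.set k (h[k]!) = h := by
          rw [getElem!_pos h k hklen]
          exact List.set_getElem_self hklen
        have := spec.1
        rwa [e] at this
      have hres := ih (pySiftup h k k (h[k]!)) (by rw [hperm.length_eq]; omega) spec.2
      exact ⟨hres.1, hres.2.trans (Multiset.coe_eq_coe.mpr hperm)⟩
    · intro j hj0 hj hjne hpne hst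
      exact hab j hj0 hj (by omega)
    · intro habs
      exact absurd habs (by omega)

theorem heapify_spec (h : List (Int × Int)) :
    IsHeap (pyHeapify h) ∧ (↑(pyHeapify h) : Multiset (Int × Int)) = ↑h := by
  unfold pyHeapify
  apply heapify_aux (h.length/2) h (by omega)
  intro j hj0 hj hst
  exfalso
  omega

theorem root_min (h : List (Int × Int)) (hh : IsHeap h) (j : Nat) (hj : j < h.length) :
    pairLt (h[j]) (h[0]'(by omega)) = false := by
  induction j using Nat.strong_induction_on with
  | _ j ih =>
    rcases Nat.eq_zero_or_pos j with h0 | h0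
    · subst h0; exact pairLt_irrefl _
    · have hp := hh j h0 hj (Nat.zero_le _)
      exact pairLt_false_trans hp (ih ((j-1)/2) (by omega) (by omega))

-- ---------- B-side: the first-minimum scan ----------
def natStep (sums : List Int) (b k : Nat) : Nat := if sums[k+1]! < sums[b]! then k+1 else b

theorem argmin_cast (sums : List Int) : ∀ (l : List Nat) (b : Nat),
    ((l.map (fun (k : Nat) => (1:Int) + k)).foldl
      (fun (acc i : Int) => if sums[i.toNat]! < sums[acc.toNat]! then i else acc) (b : Int)) =
    ((l.foldl (natStep sums) b : Nat) : Int) := by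
  intro l
  induction l with
  | nil => intro b; rfl
  | cons k t ih =>
    intro b
    simp only [List.map_cons, List.foldl_cons]
    have e1 : ((1:Int) + (k:Int)).toNat = k + 1 := by omega
    have e2 : ((b:Int)).toNat = b := by omega
    rw [e1, e2]
    unfold natStep
    by_cases hlt : sums[k+1]! < sums[b]!
    · rw [if_pos hlt, if_pos hlt]
      have e3 : (1:Int) + (k:Int) = ((k+1 : Nat) : Int) := by push_cast; ring
      rw [e3, ih]
      rfl
    · rw [if_neg hlt, if_neg hlt, ih]
      rfl

theorem argmin_natfold (sums : List Int) : ∀ (m : Nat), m < sums.length →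
    (List.range m).foldl (natStep sums) 0 ≤ m ∧
    ∀ i, i ≤ m →
      sums[(List.range m).foldl (natStep sums) 0]! < sums[i]! ∨
        (sums[(List.range m).foldl (natStep sums) 0]! = sums[i]! ∧
          (List.range m).foldl (natStep sums) 0 ≤ i) := by
  intro m
  induction m with
  | zero =>
    intro _
    refine ⟨Nat.le_refl _, ?_⟩
    intro i hi
    interval_cases i
    right; exact ⟨rfl, Nat.le_refl _⟩
  | succ m ih =>
    intro hm
    obtain ⟨ihb, ihmin⟩ := ih (by omega)
    set b := (List.range m).foldl (natStep sums) 0 with hbdef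
    have hfold : (List.range (m+1)).foldl (natStep sums) 0 = natStep sums b m := by
      rw [List.range_succ, List.foldl_append]
      rfl
    rw [hfold]
    unfold natStep
    by_cases hlt : sums[m+1]! < sums[b]!
    · rw [if_pos hlt]
      refine ⟨Nat.le_refl _, ?_⟩
      intro i hi
      rcases Nat.lt_or_ge i (m+1) with him | him
      · left
        rcases ihmin i (by omega) with h | ⟨h1, _⟩
        · omega
        · omega
      · have : i = m+1 := by omega
        subst this
        right; exact ⟨rfl, Nat.le_refl _⟩
    · rw [if_neg hlt]
      refine ⟨by omega, ?_⟩
      intro i hi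
      rcases Nat.lt_or_ge i (m+1) with him | him
      · exact ihmin i (by omega)
      · have : i = m+1 := by omega
        subst this
        rcases Int.lt_or_le sums[b]! sums[m+1]! with h | h
        · left; exact h
        · right; exact ⟨by omega, by omega⟩

-- ---------- B-side: the (sum, index) pairs of the bins ----------
def pairsOf (sums : List Int) : List (Int × Int) :=
  (List.range sums.length).map (fun (i : Nat) => (sums[i]!, (i : Int)))

theorem pairs_set (sums : List Int) (b : Nat) (hb : b < sums.length) (v : Int) :
    pairsOf (sums.set b v) = (pairsOf sums).set b (v, (b : Int)) := by
  apply List.ext_getElem (by simp [pairsOf])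
  intro i h1 h2
  have hi : i < sums.length := by simpa [pairsOf] using h1
  simp only [pairsOf, List.getElem_map, List.getElem_range, List.length_set, List.getElem_set]
  by_cases hbi : b = i
  · subst hbi
    rw [if_pos rfl, getElem!_pos (sums.set b v) b (by simpa using hi), List.getElem_set_self]
  · rw [if_neg hbi, getElem!_pos (sums.set b v) i (by simpa using hi), List.getElem_set_ne hbi,
      getElem!_pos sums i hi]

theorem argmin_spec (sums : List Int) (n : Int) (hn : sums.length = n.toNat) (hpos : 0 < n.toNat) :
    ∃ b : Nat, ((PySem.List.pyRange 1 n 1).foldl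
        (fun (acc i : Int) => if sums[i.toNat]! < sums[acc.toNat]! then i else acc) 0) = (b : Int) ∧
      b < n.toNat ∧
      ∀ i, i < sums.length →
        pairLt (sums[i]!, (i : Int)) ((sums[b]!, (b : Int))) = false := by
  have hn1 : (1:Int) ≤ n := by omega
  set m := (n - 1).toNat with hm
  have hmlen : m < sums.length := by omega
  refine ⟨(List.range m).foldl (natStep sums) 0, ?_, ?_, ?_⟩
  · rw [PySem.List.pyRange_one 1 n]
    have := argmin_cast sums (List.range ((n-1).toNat)) 0
    rw [Nat.cast_zero] at this
    rw [this]
  · have := (argmin_natfold sums m hmlen).1; omega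
  · intro i hi
    have hprop := (argmin_natfold sums m hmlen).2 i (by omega)
    rw [pairLt_false_iff]
    simp only []
    rcases hprop with h | ⟨h1, h2⟩
    · left; exact h
    · right; exact ⟨h1, by exact_mod_cast h2⟩

theorem pairs_replicate (m : Nat) :
    pairsOf (List.replicate m (0 : Int)) = (List.range m).map (fun (i : Nat) => ((0:Int), (i:Int))) := by
  unfold pairsOf
  simp only [List.length_replicate]
  apply List.map_congr_left
  intro a ha
  have : a < m := List.mem_range.mp ha
  rw [getElem!_pos (List.replicate m (0:Int)) a (by simpa using this), List.getElem_replicate]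

-- ---------- the main loop invariant ----------
theorem loop_invariant (n : Int) (l : List (Int × Int)) :
    ∀ (res : List (List Int)) (sums : List Int) (heap : List (Int × Int)),
    0 < n.toNat → sums.length = n.toNat → IsHeap heap →
    (↑heap : Multiset (Int × Int)) = ↑(pairsOf sums) →
    (l.foldl (fun (st : List (List Int) × List (Int × Int)) wo =>
      match pyHeappop st.2 with
      | none => st
      | some ((cs, idx), rest) =>
          (st.1.set idx.toNat (st.1[idx.toNat]! ++ [wo.2]), pyHeappush rest (cs + wo.1, idx)))
      (res, heap)).1 =
    (l.foldl (fun (st : List (List Int) × List Int) wo =>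
      let best : Int := (PySem.List.pyRange 1 n 1).foldl
        (fun b i => if st.2[i.toNat]! < st.2[b.toNat]! then i else b) 0
      (st.1.set best.toNat (st.1[best.toNat]! ++ [wo.2]), st.2.set best.toNat (st.2[best.toNat]! + wo.1)))
      (res, sums)).1 := by
  intro res sums heap
  induction l generalizing res sums heap with
  | nil => intro _ _ _ _; rfl
  | cons wo l ihl =>
    intro hn hlen hheap hmul
    have hplen : (pairsOf sums).length = sums.length := by simp [pairsOf]
    have hheaplen : heap.length = sums.length := by
      have := congrArg Multiset.card hmul
      simpa [Multiset.coe_card, hplen] using this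
    have hlen0 : 0 < heap.length := by omega
    have hhne : heap ≠ [] := by
      intro habs
      rw [habs] at hlen0
      simp at hlen0
    obtain ⟨r, hpop, hrheap, hrmul⟩ := heappop_spec heap hheap hhne
    obtain ⟨b, hbfold, hblt, hbmin⟩ := argmin_spec sums n hlen hn
    have hblen : b < sums.length := by omega
    -- the popped root is exactly B's chosen bin (sums[b], b)
    have hbpair_mem : ((sums[b]!, (b : Int))) ∈ heap := by
      have hmemp : ((sums[b]!, (b : Int))) ∈ pairsOf sums := by
        unfold pairsOf
        exact List.mem_map.mpr ⟨b, List.mem_range.mpr hblen, rfl⟩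
      have : ((sums[b]!, (b : Int))) ∈ (↑heap : Multiset (Int × Int)) := by
        rw [hmul]
        exact Multiset.mem_coe.mpr hmemp
      exact Multiset.mem_coe.mp this
    have heq : heap[0]'hlen0 = ((sums[b]!, (b : Int))) := by
      obtain ⟨j, hj, hjeq⟩ := List.mem_iff_getElem.mp hbpair_mem
      have h1 : pairLt ((sums[b]!, (b : Int))) (heap[0]'hlen0) = false := by
        rw [← hjeq]
        exact root_min heap hheap j hj
      have hrm : heap[0]'hlen0 ∈ pairsOf sums := by
        have : heap[0]'hlen0 ∈ (↑heap : Multiset (Int × Int)) :=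
          Multiset.mem_coe.mpr (List.getElem_mem hlen0)
        rw [hmul] at this
        exact Multiset.mem_coe.mp this
      unfold pairsOf at hrm
      obtain ⟨k, hk, hkeq⟩ := List.mem_map.mp hrm
      have h2 : pairLt (heap[0]'hlen0) ((sums[b]!, (b : Int))) = false := by
        rw [← hkeq]
        exact hbmin k (List.mem_range.mp hk)
      exact pairLt_antisymm h2 h1
    simp only [List.foldl_cons]
    rw [hpop, heq]
    rw [hbfold]
    simp only [Int.toNat_natCast]
    exact ihl (res.set b (res[b]! ++ [wo.2])) (sums.set b (sums[b]! + wo.1))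
      (pyHeappush r (sums[b]! + wo.1, (b : Int))) hn (by simpa using hlen)
      (heappush_spec r _ hrheap).1 (by
        rw [(heappush_spec r _ hrheap).2, pairs_set sums b hblen]
        have hms := mset_set (pairsOf sums) b (by omega) ((sums[b]! + wo.1, (b : Int)))
        have hpb : (pairsOf sums)[b]'(by omega) = ((sums[b]!, (b : Int))) := by
          simp [pairsOf]
        rw [hpb] at hms
        have hkey : (↑((pairsOf sums).set b ((sums[b]! + wo.1, (b : Int)))) : Multiset (Int × Int)) + {((sums[b]!, (b : Int)))} =
            ({((sums[b]! + wo.1, (b : Int)))} + ↑r) + {((sums[b]!, (b : Int)))} := by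
          rw [hms, ← hmul, hrmul, heq]
          abel
        exact (add_right_cancel hkey).symm)

-- ===== VERDICT (by name: the statement is the Claim_ definition above) =====
theorem split_weighted_objects_py_spec : Claim_equal_split_weighted_objects_py := by
  intro items n hdom hpre
  unfold Spec_split_weighted_objects_py split_weighted_objects_py split_weighted_objects_py_alt
  rcases Nat.eq_zero_or_pos n.toNat with hn | hn
  · have hitems : items = [] := by
      rcases hpre with h | h
      · exact h
      · exfalso; omega
    subst hitems
    simp [PySem.List.sorted]
  · apply loop_invariant n _ _ _ _ hn (by simp)
    · exact (heapify_spec _).1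
    · rw [(heapify_spec _).2, pairs_replicate]
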